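-- pv_equiv track=rewrite | github.com/sadmansharif31/Algorithm-Labs-CSE221 | CSE221_Labs/Lab-4/Lab-4 (Solution)/Task06/Task06.py | diamond_search
-- ===== SOURCE A (Python) =====
-- def diamond_search(grid, row, col, diamond):   # using the DFS method
--
--     if(row<0 or col<0 or row>=len(grid) or col>=len(grid[0]) or grid[row][col]=="#"):
--         return diamond
--
--     if(grid[row][col] == "D"):
--         diamond += 1
--
--     grid[row][col] = "#"
--
--     diamond = diamond_search(grid, row+1, col, diamond)
--     diamond = diamond_search(grid, row-1, col, diamond)
--     diamond = diamond_search(grid, row, col+1, diamond)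
--     diamond = diamond_search(grid, row, col-1, diamond)
--
--     return diamond
-- ===== SOURCE B (Python) =====
-- def diamond_search(grid, row, col, diamond):
--     # Two-phase flood fill: collect the connected component with a worklist and a
--     # visited list (reading the grid only), then count the diamonds in it, then
--     # mark the component cells "#" (same in-place mutation as A).
--     rows = len(grid)
--     cols = len(grid[0]) if grid else 0
--     comp = []
--     frontier = [(row, col)]
--     while frontier:
--         r, c = frontier.pop()
--         if r < 0 or c < 0 or r >= rows or c >= cols or grid[r][c] == "#" or (r, c) in comp:
--             continue
--         comp.append((r, c))
--         frontier.extend([(r, c - 1), (r, c + 1), (r - 1, c), (r + 1, c)])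
--     total = diamond + sum(grid[r][c] == "D" for r, c in comp)
--     for r, c in comp:
--         grid[r][c] = "#"
--     return total
-- ===== Notes on version B (the rewrite author's own statement) =====
-- stated objective: alternative
-- what changed: Replaces A's recursive mark-as-you-go DFS by a two-phase algorithm: a read-only worklist flood fill that collects the component into a visited list, then a separate counting pass over that list (and a final marking pass for the same in-place mutation).
-- outside the precondition, e.g. on diamond_search([['D', '#'], ['#']], 0, 0, 0): A returns 1, B returns 1
import Mathlib
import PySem

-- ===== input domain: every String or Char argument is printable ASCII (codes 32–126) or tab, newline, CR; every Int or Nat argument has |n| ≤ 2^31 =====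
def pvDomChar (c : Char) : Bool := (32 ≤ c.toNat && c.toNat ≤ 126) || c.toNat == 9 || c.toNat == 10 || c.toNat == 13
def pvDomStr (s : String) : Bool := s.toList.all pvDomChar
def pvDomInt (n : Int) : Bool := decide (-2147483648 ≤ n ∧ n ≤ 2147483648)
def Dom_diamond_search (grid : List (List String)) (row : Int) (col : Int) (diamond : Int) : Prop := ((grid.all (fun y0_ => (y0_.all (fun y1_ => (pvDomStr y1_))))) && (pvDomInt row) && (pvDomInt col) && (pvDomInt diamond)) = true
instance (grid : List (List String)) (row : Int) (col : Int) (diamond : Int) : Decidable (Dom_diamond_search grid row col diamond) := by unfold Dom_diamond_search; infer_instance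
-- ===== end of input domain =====

-- B replaces A's recursive mark-as-you-go DFS by a two-phase algorithm: a read-only worklist
-- flood fill collecting the component into a visited list, then a separate counting pass over it
-- (objective: alternative decomposition). Both Pythons mutate the grid in place identically
-- (component cells become "#"); the equivalence proved here is about the return value.

-- read cell (r,c); only evaluated under the bounds guard, where 0 ≤ r,c and the indices are in
-- range (inside Pre_, rectangular grids), so getD with toNat is exact for Python's grid[r][c]
def pvCellAt (g : List (List String)) (r c : Int) : String :=
  (g.getD r.toNat []).getD c.toNat ""

-- total number of cells
def pvCells (g : List (List String)) : Nat := (g.map List.length).sum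

-- ===== PORT A =====
-- grid[r][c] = v, same in-range regime
def pvSetAt (g : List (List String)) (r c : Int) (v : String) : List (List String) :=
  g.set r.toNat ((g.getD r.toNat []).set c.toNat v)

-- A's bounds/wall guard: row<0 or col<0 or row>=len(grid) or col>=len(grid[0]) or grid[row][col]=="#"
def pvGuard (g : List (List String)) (r c : Int) : Bool :=
  decide (r < 0) || decide (c < 0) || decide ((g.length : Int) ≤ r) ||
    decide (((g.headD []).length : Int) ≤ c) || (pvCellAt g r c == "#")

-- A's recursion, grid-threading (Python mutates grid in place); fuel only makes it total:
-- the call-tree depth is ≤ pvCells g + 1, so the fuel given below never runs out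
def pvDfs : Nat → List (List String) → Int → Int → Int → (List (List String)) × Int
  | 0, g, _, _, d => (g, d)
  | fuel + 1, g, r, c, d =>
    if pvGuard g r c then
      (g, d)
    else
      let d1 := if pvCellAt g r c = "D" then d + 1 else d
      let g1 := pvSetAt g r c "#"
      let p1 := pvDfs fuel g1 (r + 1) c d1
      let p2 := pvDfs fuel p1.1 (r - 1) c p1.2
      let p3 := pvDfs fuel p2.1 r (c + 1) p2.2
      pvDfs fuel p3.1 r (c - 1) p3.2

def diamond_search (grid : List (List String)) (row : Int) (col : Int) (diamond : Int) : Int :=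
  (pvDfs (pvCells grid + 1) grid row col diamond).2

-- ===== PORT B =====
-- Source B's skip condition: out of bounds, a wall in the (unmutated) grid, or already collected
def pvBGuard (g : List (List String)) (comp : List (Int × Int)) (r c : Int) : Bool :=
  decide (r < 0) || decide (c < 0) || decide ((g.length : Int) ≤ r) ||
    decide (((g.headD []).length : Int) ≤ c) || (pvCellAt g r c == "#") ||
    decide ((r, c) ∈ comp)

-- Source B's while loop: pop a cell from the worklist (Python pops the list's end; here the Lean
-- list's head is that end, so extend's last entry (r+1,c) is popped first), skip or collect it
-- into comp and push the four neighbours. Fuel only makes it total: each iteration pops one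
-- entry and at most 1 + 4·pvCells g entries are ever pushed.
def pvComp : Nat → List (List String) → List (Int × Int) → List (Int × Int) → List (Int × Int)
  | 0, _, comp, _ => comp
  | _ + 1, _, comp, [] => comp
  | fuel + 1, g, comp, (r, c) :: F =>
    if pvBGuard g comp r c then
      pvComp fuel g comp F
    else
      pvComp fuel g (comp ++ [(r, c)]) ((r + 1, c) :: (r - 1, c) :: (r, c + 1) :: (r, c - 1) :: F)

-- phase 2 of Source B: count the "D" cells of the collected component in the original grid
def diamond_search_alt (grid : List (List String)) (row : Int) (col : Int) (diamond : Int) : Int :=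
  diamond +
    ((pvComp (4 * pvCells grid + 2) grid [] [(row, col)]).countP
      (fun rc => pvCellAt grid rc.1 rc.2 == "D") : Nat)

-- ===== PRECONDITION & SPEC =====
-- no row shorter than the first: A's column guard uses len(grid[0]) but indexes grid[row]
def pvWide (g : List (List String)) : Prop :=
  ∀ n ∈ g.map List.length, (g.map List.length).headD 0 ≤ n

-- Pre_ excludes grids with a row shorter than row 0 whose search really starts (the start cell is
-- in bounds and not a wall): there A can raise IndexError when the fill reaches the short row; on
-- such excluded inputs where A happens to return (short row unreached), B behaves the same,
-- but neither value is claimed.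
def Pre_diamond_search (grid : List (List String)) (row : Int) (col : Int) (diamond : Int) : Prop :=
  pvWide grid ∨ pvGuard grid row col = true
instance (grid : List (List String)) (row : Int) (col : Int) (diamond : Int) : Decidable (Pre_diamond_search grid row col diamond) := by unfold Pre_diamond_search pvWide; infer_instance

def pvWitness_diamond_search : List (List String) × Int × Int × Int :=
  ([["D", "."], [".", "D"]], 0, 0, 0)

def Spec_diamond_search (grid : List (List String)) (row : Int) (col : Int) (diamond : Int) (out : Int) : Prop := out = diamond_search_alt grid row col diamond
instance (grid : List (List String)) (row : Int) (col : Int) (diamond : Int) (out : Int) : Decidable (Spec_diamond_search grid row col diamond out) := by unfold Spec_diamond_search; infer_instance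

-- ===== CLAIM (what is proved, stated in full; the proofs are below) =====
def Claim_equal_diamond_search : Prop := ∀ (grid : List (List String)) (row : Int) (col : Int) (diamond : Int), Dom_diamond_search grid row col diamond → Pre_diamond_search grid row col diamond → Spec_diamond_search grid row col diamond (diamond_search grid row col diamond)

-- ===== LEMMAS AND PROOFS =====

-- number of cells ≠ "#" (the decreasing measure)
def pvBurn (g : List (List String)) : Nat :=
  (g.map (fun row => row.countP (fun s => !(s == "#")))).sum

-- A's recursion folded over a worklist: the reference both ports are related to
def pvRun (fuel : Nat) (g : List (List String)) (S : List (Int × Int)) (d : Int) :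
    (List (List String)) × Int :=
  S.foldl (fun p rc => pvDfs fuel p.1 rc.1 rc.2 p.2) (g, d)

-- B's comp list replayed as in-place marking: the grid A's recursion threads
def pvMark (g : List (List String)) (S : List (Int × Int)) : List (List String) :=
  S.foldl (fun h rc => pvSetAt h rc.1 rc.2 "#") g

-- the loop invariant on B's comp list: distinct, in-bounds, non-wall cells
def pvInv (g : List (List String)) (comp : List (Int × Int)) : Prop :=
  comp.Nodup ∧ ∀ p ∈ comp, 0 ≤ p.1 ∧ 0 ≤ p.2 ∧ p.1 < (g.length : Int) ∧
    p.2 < ((g.headD []).length : Int) ∧ pvCellAt g p.1 p.2 ≠ "#"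

-- equation lemmas
theorem pvDfs_pos (fuel : Nat) (g : List (List String)) (r c d : Int) (h : pvGuard g r c = true) :
    pvDfs (fuel + 1) g r c d = (g, d) := by
  rw [pvDfs, if_pos h]

theorem pvDfs_neg (fuel : Nat) (g : List (List String)) (r c d : Int) (h : ¬ pvGuard g r c = true) :
    pvDfs (fuel + 1) g r c d
      = pvRun fuel (pvSetAt g r c "#") [(r + 1, c), (r - 1, c), (r, c + 1), (r, c - 1)]
          (if pvCellAt g r c = "D" then d + 1 else d) := by
  rw [pvDfs, if_neg h]; rfl

theorem pvComp_nil (fuel : Nat) (g : List (List String)) (comp : List (Int × Int)) :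
    pvComp fuel g comp [] = comp := by
  cases fuel <;> rw [pvComp]

theorem pvComp_pos (fuel : Nat) (g : List (List String)) (comp : List (Int × Int)) (r c : Int)
    (F : List (Int × Int)) (h : pvBGuard g comp r c = true) :
    pvComp (fuel + 1) g comp ((r, c) :: F) = pvComp fuel g comp F := by
  rw [pvComp, if_pos h]

theorem pvComp_neg (fuel : Nat) (g : List (List String)) (comp : List (Int × Int)) (r c : Int)
    (F : List (Int × Int)) (h : ¬ pvBGuard g comp r c = true) :
    pvComp (fuel + 1) g comp ((r, c) :: F)
      = pvComp fuel g (comp ++ [(r, c)])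
          ([(r + 1, c), (r - 1, c), (r, c + 1), (r, c - 1)] ++ F) := by
  rw [pvComp, if_neg h]; rfl

theorem pv_run_cons (fuel : Nat) (g : List (List String)) (r c : Int) (S : List (Int × Int))
    (d : Int) :
    pvRun fuel g ((r, c) :: S) d
      = pvRun fuel (pvDfs fuel g r c d).1 S (pvDfs fuel g r c d).2 := by
  unfold pvRun
  simp [List.foldl_cons]

theorem pv_run_append (fuel : Nat) (g : List (List String)) (S1 S2 : List (Int × Int)) (d : Int) :
    pvRun fuel g (S1 ++ S2) d = pvRun fuel (pvRun fuel g S1 d).1 S2 (pvRun fuel g S1 d).2 := by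
  unfold pvRun
  rw [List.foldl_append]

theorem pv_mark_cons (g : List (List String)) (r c : Int) (S : List (Int × Int)) :
    pvMark g ((r, c) :: S) = pvMark (pvSetAt g r c "#") S := rfl

theorem pv_mark_snoc (g : List (List String)) (S : List (Int × Int)) (r c : Int) :
    pvMark g (S ++ [(r, c)]) = pvSetAt (pvMark g S) r c "#" := by
  unfold pvMark; rw [List.foldl_append]; rfl

-- shape lemmas
theorem pv_map_length_set (g : List (List String)) (r c : Int) (v : String) :
    (pvSetAt g r c v).map List.length = g.map List.length := by
  unfold pvSetAt
  rw [List.map_set]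
  by_cases h : r.toNat < g.length
  · have hg : g.getD r.toNat [] = g[r.toNat] := List.getD_eq_getElem g [] h
    apply List.ext_getElem (by simp)
    intro i h1 h2
    rw [List.getElem_set]
    split_ifs with hi
    · subst hi; simp [List.getElem?_eq_getElem h]
    · rfl
  · rw [List.set_eq_of_length_le (by simpa using Nat.le_of_not_lt h)]

theorem pv_map_length_mark (S : List (Int × Int)) :
    ∀ (g : List (List String)), (pvMark g S).map List.length = g.map List.length := by
  induction S with
  | nil => intro g; rfl
  | cons x xs ih =>
    intro g
    obtain ⟨r, c⟩ := x
    rw [pv_mark_cons, ih, pv_map_length_set]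

theorem pv_rect_set (g : List (List String)) (r c : Int) (v : String) (h : pvWide g) :
    pvWide (pvSetAt g r c v) := by
  unfold pvWide at *; rw [pv_map_length_set]; exact h

theorem pv_rect_of_map (g g' : List (List String))
    (h : g'.map List.length = g.map List.length) (hr : pvWide g) : pvWide g' := by
  unfold pvWide at *; rw [h]; exact hr

theorem pv_headD_len (g : List (List String)) :
    ((g.headD []).length : Int) = ((g.map List.length).headD 0 : Nat) := by
  cases g <;> simp

theorem pv_len_eq_of_map (g g' : List (List String))
    (h : g'.map List.length = g.map List.length) :
    g'.length = g.length ∧ (g'.headD []).length = (g.headD []).length := by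
  constructor
  · have := congrArg List.length h; simpa using this
  · have h1 := pv_headD_len g'
    have h2 := pv_headD_len g
    rw [h] at h1; omega

-- reading a cell after a single in-range write
theorem pv_cell_setAt (g : List (List String)) (r c r' c' : Int) (hrect : pvWide g)
    (hr : 0 ≤ r) (hc : 0 ≤ c) (hrl : r < (g.length : Int)) (hcl : c < ((g.headD []).length : Int))
    (hr' : 0 ≤ r') (hc' : 0 ≤ c') (hrl' : r' < (g.length : Int))
    (hcl' : c' < ((g.headD []).length : Int)) :
    pvCellAt (pvSetAt g r' c' "#") r c
      = if r = r' ∧ c = c' then "#" else pvCellAt g r c := by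
  have hi : r.toNat < g.length := by omega
  have hi' : r'.toNat < g.length := by omega
  have hg' : g.getD r'.toNat [] = g[r'.toNat] := List.getD_eq_getElem g [] hi'
  have hrow' : (g.map List.length).headD 0 ≤ (g[r'.toNat] : List String).length := by
    have : (g[r'.toNat] : List String).length ∈ g.map List.length := by
      simp only [List.mem_map]
      exact ⟨g[r'.toNat], List.getElem_mem hi', rfl⟩
    exact hrect _ this
  have hrow : (g.map List.length).headD 0 ≤ (g[r.toNat] : List String).length := by
    have : (g[r.toNat] : List String).length ∈ g.map List.length := by
      simp only [List.mem_map]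
      exact ⟨g[r.toNat], List.getElem_mem hi, rfl⟩
    exact hrect _ this
  have hhead := pv_headD_len g
  have hj : c.toNat < (g[r.toNat] : List String).length := by omega
  have hj' : c'.toNat < (g[r'.toNat] : List String).length := by omega
  unfold pvCellAt pvSetAt
  by_cases hrr : r = r'
  · subst hrr
    rw [hg']
    rw [List.getD_eq_getElem _ [] (by simpa using hi)]
    rw [List.getElem_set_self (by simpa using hi')]
    by_cases hcc : c = c'
    · subst hcc
      rw [if_pos ⟨rfl, rfl⟩]
      rw [List.getD_eq_getElem _ "" (by simpa using hj')]
      rw [List.getElem_set_self (by simpa using hj')]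
    · rw [if_neg (by tauto)]
      have hne : c.toNat ≠ c'.toNat := by omega
      rw [List.getD_eq_getElem _ "" (by simpa using hj)]
      rw [List.getElem_set_ne (by omega)]
      rw [List.getD_eq_getElem _ "" hj]
  · rw [if_neg (by tauto)]
    have hne : r.toNat ≠ r'.toNat := by omega
    rw [List.getD_eq_getElem _ [] (by simpa using hi)]
    rw [List.getElem_set_ne (by omega)]
    rw [List.getD_eq_getElem g [] hi]

-- reading a cell after marking a list of in-bounds cells
theorem pv_cell_mark (S : List (Int × Int)) :
    ∀ (g : List (List String)) (r c : Int), pvWide g →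
      (∀ p ∈ S, 0 ≤ p.1 ∧ 0 ≤ p.2 ∧ p.1 < (g.length : Int) ∧
        p.2 < ((g.headD []).length : Int)) →
      0 ≤ r → 0 ≤ c → r < (g.length : Int) → c < ((g.headD []).length : Int) →
      pvCellAt (pvMark g S) r c = if (r, c) ∈ S then "#" else pvCellAt g r c := by
  induction S with
  | nil => intro g r c _ _ _ _ _ _; simp [pvMark]
  | cons x xs ih =>
    intro g r c hrect hS hr hc hrl hcl
    obtain ⟨r', c'⟩ := x
    obtain ⟨hr', hc', hrl', hcl'⟩ := hS (r', c') (by simp)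
    have hlen := pv_len_eq_of_map g (pvSetAt g r' c' "#") (pv_map_length_set g r' c' "#")
    rw [pv_mark_cons]
    rw [ih (pvSetAt g r' c' "#") r c
      (pv_rect_set g r' c' "#" hrect)
      (by intro p hp
          obtain ⟨a1, a2, a3, a4⟩ := hS p (by simp [hp])
          exact ⟨a1, a2, by omega, by omega⟩)
      hr hc (by omega) (by omega)]
    rw [pv_cell_setAt g r c r' c' hrect hr hc hrl hcl hr' hc' hrl' hcl']
    by_cases h1 : (r, c) ∈ xs
    · rw [if_pos h1, if_pos (by simp [h1])]
    · rw [if_neg h1]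
      by_cases h2 : r = r' ∧ c = c'
      · rw [if_pos h2, if_pos (by simp [h2.1, h2.2])]
      · rw [if_neg h2, if_neg (by simp; push_neg; exact ⟨fun ha hb => h2 ⟨ha, hb⟩, h1⟩)]

-- relating A's guard on the marked grid with B's skip condition on the original grid
theorem pv_guard_mark (g : List (List String)) (comp : List (Int × Int)) (r c : Int)
    (hrect : pvWide g) (hinv : pvInv g comp) :
    pvGuard (pvMark g comp) r c = pvBGuard g comp r c := by
  obtain ⟨hlen, hhd⟩ := pv_len_eq_of_map g (pvMark g comp) (pv_map_length_mark comp g)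
  by_cases hb : 0 ≤ r ∧ 0 ≤ c ∧ r < (g.length : Int) ∧ c < ((g.headD []).length : Int)
  · obtain ⟨hr, hc, hrl, hcl⟩ := hb
    have hcell := pv_cell_mark comp g r c hrect
      (fun p hp => by obtain ⟨a1, a2, a3, a4, _⟩ := hinv.2 p hp; exact ⟨a1, a2, a3, a4⟩)
      hr hc hrl hcl
    unfold pvGuard pvBGuard
    rw [hcell, hlen, hhd]
    by_cases hm : (r, c) ∈ comp
    · rw [if_pos hm]
      simp [hm]
    · rw [if_neg hm]
      simp [hm]
  · unfold pvGuard pvBGuard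
    rw [hlen, hhd]
    rcases lt_or_ge r 0 with h | h
    · have hd : decide (r < 0) = true := decide_eq_true h
      simp only [hd, Bool.true_or]
    rcases lt_or_ge c 0 with h2 | h2
    · have hd : decide (c < 0) = true := decide_eq_true h2
      simp only [hd, Bool.true_or, Bool.or_true]
    rcases lt_or_ge r (g.length : Int) with h3 | h3
    · rcases lt_or_ge c ((g.headD []).length : Int) with h4 | h4
      · exact (hb ⟨h, h2, h3, h4⟩).elim
      · have hd : decide (((g.headD []).length : Int) ≤ c) = true := decide_eq_true h4
        simp only [hd, Bool.or_true, Bool.true_or]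
    · have hd : decide ((g.length : Int) ≤ r) = true := decide_eq_true h3
      simp only [hd, Bool.or_true, Bool.true_or]

-- arithmetic on the burn measure
theorem pv_sum_set_nat (l : List Nat) (i : Nat) (a : Nat) (h : i < l.length) :
    (l.set i a).sum + l[i] = l.sum + a := by
  induction l generalizing i with
  | nil => simp at h
  | cons x xs ih =>
    cases i with
    | zero => simp [List.set]; omega
    | succ j =>
      simp only [List.set, List.sum_cons, List.getElem_cons_succ]
      have := ih j (by simpa using h)
      omega

theorem pv_countP_set (l : List String) (j : Nat) (v : String) (p : String → Bool)
    (h : j < l.length) :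
    (l.set j v).countP p + (if p l[j] then 1 else 0) = l.countP p + (if p v then 1 else 0) := by
  induction l generalizing j with
  | nil => simp at h
  | cons x xs ih =>
    cases j with
    | zero => simp [List.set, List.countP_cons]; split_ifs <;> omega
    | succ k =>
      simp only [List.set, List.countP_cons, List.getElem_cons_succ]
      have := ih k (by simpa using h)
      split_ifs at this ⊢ <;> omega

theorem pv_countP_set_le (l : List String) (j : Nat) :
    (l.set j "#").countP (fun s => !(s == "#")) ≤ l.countP (fun s => !(s == "#")) := by
  by_cases h : j < l.length
  · have := pv_countP_set l j "#" (fun s => !(s == "#")) h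
    simp at this; omega
  · rw [List.set_eq_of_length_le (Nat.le_of_not_lt h)]

theorem pv_burn_set_le (g : List (List String)) (r c : Int) :
    pvBurn (pvSetAt g r c "#") ≤ pvBurn g := by
  unfold pvBurn pvSetAt
  by_cases h : r.toNat < g.length
  · have hg : g.getD r.toNat [] = g[r.toNat] := List.getD_eq_getElem g [] h
    rw [hg, List.map_set]
    have hlen : r.toNat < (g.map (fun row => row.countP (fun s => !(s == "#")))).length := by
      simpa using h
    have hs := pv_sum_set_nat _ r.toNat (((g[r.toNat] : List String).set c.toNat "#").countP (fun s => !(s == "#"))) hlen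
    have hle := pv_countP_set_le (g[r.toNat]) c.toNat
    simp only [List.getElem_map] at hs
    omega
  · rw [List.set_eq_of_length_le (by simpa using Nat.le_of_not_lt h)]

-- under the failed guard and rectangularity, burning the cell decreases pvBurn by exactly one
theorem pv_burn_set_succ (g : List (List String)) (r c : Int)
    (hrect : pvWide g) (hguard : ¬ pvGuard g r c = true) :
    pvBurn (pvSetAt g r c "#") + 1 = pvBurn g := by
  unfold pvGuard at hguard
  simp only [Bool.or_eq_true, decide_eq_true_eq, beq_iff_eq, not_or, not_lt, not_le] at hguard
  obtain ⟨⟨⟨⟨hr0, hc0⟩, hr⟩, hc⟩, hcell⟩ := hguard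
  have hi : r.toNat < g.length := by omega
  have hg : g.getD r.toNat [] = g[r.toNat] := List.getD_eq_getElem g [] hi
  have hrow : (g.map List.length).headD 0 ≤ (g[r.toNat] : List String).length := by
    have : (g[r.toNat] : List String).length ∈ g.map List.length := by
      simp only [List.mem_map]
      exact ⟨g[r.toNat], List.getElem_mem hi, rfl⟩
    exact hrect _ this
  have hj : c.toNat < (g[r.toNat] : List String).length := by
    have := pv_headD_len g
    omega
  have hcell' : (g[r.toNat] : List String)[c.toNat] ≠ "#" := by
    unfold pvCellAt at hcell
    rw [hg, List.getD_eq_getElem _ "" hj] at hcell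
    exact hcell
  unfold pvBurn pvSetAt
  rw [hg, List.map_set]
  have hlen : r.toNat < (g.map (fun row => row.countP (fun s => !(s == "#")))).length := by
    simpa using hi
  have hs := pv_sum_set_nat _ r.toNat (((g[r.toNat] : List String).set c.toNat "#").countP (fun s => !(s == "#"))) hlen
  simp only [List.getElem_map] at hs
  have hcp := pv_countP_set (g[r.toNat]) c.toNat "#" (fun s => !(s == "#")) hj
  have hx : (!((g[r.toNat] : List String)[c.toNat] == "#")) = true := by simpa using hcell'
  rw [if_pos hx, if_neg (by simp : ¬ ((!("#" == "#")) = true))] at hcp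
  omega

theorem pv_burn_le_cells (g : List (List String)) : pvBurn g ≤ pvCells g := by
  unfold pvBurn pvCells
  induction g with
  | nil => simp
  | cons x xs ih =>
    simp only [List.map_cons, List.sum_cons]
    have := List.countP_le_length (p := fun s => !(s == "#")) (l := x)
    omega

-- pvDfs (hence pvRun) never increases pvBurn and preserves the row-length profile
theorem pv_dfs_mono (fuel : Nat) :
    ∀ (g : List (List String)) (r c d : Int),
      pvBurn (pvDfs fuel g r c d).1 ≤ pvBurn g ∧
      ((pvDfs fuel g r c d).1).map List.length = g.map List.length := by
  induction fuel with
  | zero => intro g r c d; simp [pvDfs]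
  | succ fuel ih =>
    have hrun : ∀ (S : List (Int × Int)) (g : List (List String)) (d : Int),
        pvBurn (pvRun fuel g S d).1 ≤ pvBurn g ∧
        ((pvRun fuel g S d).1).map List.length = g.map List.length := by
      intro S
      induction S with
      | nil => intro g d; simp [pvRun]
      | cons x xs ihS =>
        intro g d
        obtain ⟨r, c⟩ := x
        rw [pv_run_cons]
        obtain ⟨ha, hb⟩ := ihS (pvDfs fuel g r c d).1 (pvDfs fuel g r c d).2
        obtain ⟨ma, mb⟩ := ih g r c d
        exact ⟨by omega, by rw [hb, mb]⟩
    intro g r c d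
    by_cases hguard : pvGuard g r c = true
    · rw [pvDfs_pos fuel g r c d hguard]; simp
    · rw [pvDfs_neg fuel g r c d hguard]
      obtain ⟨ha, hb⟩ := hrun [(r + 1, c), (r - 1, c), (r, c + 1), (r, c - 1)]
        (pvSetAt g r c "#") (if pvCellAt g r c = "D" then d + 1 else d)
      have hset := pv_burn_set_le g r c
      have hlen := pv_map_length_set g r c "#"
      exact ⟨by omega, by rw [hb, hlen]⟩

-- the result of pvDfs is independent of the fuel as long as fuel > pvBurn g
theorem pv_dfs_fuel (n : Nat) :
    ∀ (g : List (List String)) (r c d : Int) (f1 f2 : Nat),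
      pvWide g → pvBurn g ≤ n → n < f1 → n < f2 →
      pvDfs f1 g r c d = pvDfs f2 g r c d := by
  induction n with
  | zero =>
    intro g r c d f1 f2 hrect hb h1 h2
    obtain ⟨f1', rfl⟩ : ∃ k, f1 = k + 1 := ⟨f1 - 1, by omega⟩
    obtain ⟨f2', rfl⟩ : ∃ k, f2 = k + 1 := ⟨f2 - 1, by omega⟩
    by_cases hguard : pvGuard g r c = true
    · rw [pvDfs_pos _ _ _ _ _ hguard, pvDfs_pos _ _ _ _ _ hguard]
    · exfalso
      have := pv_burn_set_succ g r c hrect hguard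
      omega
  | succ n ih =>
    intro g r c d f1 f2 hrect hb h1 h2
    obtain ⟨f1', rfl⟩ : ∃ k, f1 = k + 1 := ⟨f1 - 1, by omega⟩
    obtain ⟨f2', rfl⟩ : ∃ k, f2 = k + 1 := ⟨f2 - 1, by omega⟩
    by_cases hguard : pvGuard g r c = true
    · rw [pvDfs_pos _ _ _ _ _ hguard, pvDfs_pos _ _ _ _ _ hguard]
    · rw [pvDfs_neg _ _ _ _ _ hguard, pvDfs_neg _ _ _ _ _ hguard]
      have hburn := pv_burn_set_succ g r c hrect hguard
      have hrect1 : pvWide (pvSetAt g r c "#") := pv_rect_set g r c "#" hrect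
      have hrun : ∀ (S : List (Int × Int)) (g' : List (List String)) (d' : Int),
          pvWide g' → pvBurn g' ≤ n → pvRun f1' g' S d' = pvRun f2' g' S d' := by
        intro S
        induction S with
        | nil => intro g' d' _ _; simp [pvRun]
        | cons x xs ihS =>
          intro g' d' hre hbu
          obtain ⟨r', c'⟩ := x
          rw [pv_run_cons, pv_run_cons]
          rw [ih g' r' c' d' f1' f2' hre hbu (by omega) (by omega)]
          obtain ⟨ma, mb⟩ := pv_dfs_mono f2' g' r' c' d'
          exact ihS _ _ (pv_rect_of_map g' _ mb hre) (by omega)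
      exact hrun _ _ _ hrect1 (by omega)

theorem pv_run_fuel (S : List (Int × Int)) (g : List (List String)) (d : Int) (n f1 f2 : Nat)
    (hrect : pvWide g) (hb : pvBurn g ≤ n) (h1 : n < f1) (h2 : n < f2) :
    pvRun f1 g S d = pvRun f2 g S d := by
  induction S generalizing g d with
  | nil => simp [pvRun]
  | cons x xs ih =>
    obtain ⟨r, c⟩ := x
    rw [pv_run_cons, pv_run_cons]
    rw [pv_dfs_fuel n g r c d f1 f2 hrect hb h1 h2]
    obtain ⟨ma, mb⟩ := pv_dfs_mono f2 g r c d
    exact ih _ _ (pv_rect_of_map g _ mb hrect) (by omega)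

-- main invariant: A's DFS fold over a worklist, started on the grid with comp marked,
-- collects exactly the cells B's loop appends to comp, and adds their "D"-count
theorem pv_main (k : Nat) :
    ∀ (g : List (List String)) (comp F : List (Int × Int)) (d : Int) (f1 f2 : Nat),
      pvWide g → pvInv g comp →
      5 * pvBurn (pvMark g comp) + F.length ≤ k →
      pvBurn (pvMark g comp) < f1 →
      F.length + 4 * pvBurn (pvMark g comp) < f2 →
      ∃ new, pvComp f2 g comp F = comp ++ new ∧
        pvRun f1 (pvMark g comp) F d
          = (pvMark g (comp ++ new),
             d + (new.countP (fun rc => pvCellAt g rc.1 rc.2 == "D") : Nat)) ∧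
        pvInv g (comp ++ new) := by
  induction k with
  | zero =>
    intro g comp F d f1 f2 hrect hinv hk h1 h2
    have hF : F = [] := by
      cases F with
      | nil => rfl
      | cons x xs => simp at hk
    subst hF
    exact ⟨[], by rw [pvComp_nil]; simp, by simp [pvRun], by simpa using hinv⟩
  | succ k ih =>
    intro g comp F d f1 f2 hrect hinv hk h1 h2
    obtain ⟨f2', rfl⟩ : ∃ m, f2 = m + 1 := ⟨f2 - 1, by omega⟩
    cases F with
    | nil =>
      exact ⟨[], by rw [pvComp_nil]; simp, by simp [pvRun], by simpa using hinv⟩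
    | cons x F' =>
      obtain ⟨r, c⟩ := x
      obtain ⟨f1', rfl⟩ : ∃ m, f1 = m + 1 := ⟨f1 - 1, by omega⟩
      have hmrect : pvWide (pvMark g comp) :=
        pv_rect_of_map g _ (pv_map_length_mark comp g) hrect
      have hgeq := pv_guard_mark g comp r c hrect hinv
      by_cases hguard : pvBGuard g comp r c = true
      · -- skipped cell: both sides just move on
        rw [pvComp_pos _ _ _ _ _ _ hguard]
        rw [pv_run_cons, pvDfs_pos _ _ _ _ _ (by rw [hgeq]; exact hguard)]
        exact ih g comp F' d (f1' + 1) f2' hrect hinv (by simp at hk ⊢; omega) h1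
          (by simp at h2 ⊢; omega)
      · -- collected cell
        have hAg : ¬ pvGuard (pvMark g comp) r c = true := by rw [hgeq]; exact hguard
        -- the failed skip condition, componentwise
        have hguard' := hguard
        unfold pvBGuard at hguard'
        simp only [Bool.or_eq_true, decide_eq_true_eq, beq_iff_eq, not_or, not_lt,
          not_le] at hguard'
        obtain ⟨⟨⟨⟨⟨hr0, hc0⟩, hrl⟩, hcl⟩, hwall⟩, hmem⟩ := hguard'
        have hcellm : pvCellAt (pvMark g comp) r c = pvCellAt g r c := by
          rw [pv_cell_mark comp g r c hrect
            (fun p hp => by obtain ⟨a1, a2, a3, a4, _⟩ := hinv.2 p hp; exact ⟨a1, a2, a3, a4⟩)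
            hr0 hc0 (by omega) (by omega), if_neg hmem]
        have hburn := pv_burn_set_succ (pvMark g comp) r c hmrect hAg
        have hinv' : pvInv g (comp ++ [(r, c)]) := by
          constructor
          · exact List.Nodup.append hinv.1 (by simp) (by simpa using hmem)
          · intro p hp
            rcases List.mem_append.mp hp with h | h
            · exact hinv.2 p h
            · simp at h; subst h
              exact ⟨hr0, hc0, by omega, by omega, hwall⟩
        rw [pvComp_neg _ _ _ _ _ _ hguard]
        rw [pv_run_cons]
        -- one A-step on the marked grid: recursion on the four neighbours
        have hstep : pvDfs (f1' + 1) (pvMark g comp) r c d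
            = pvRun (f1' + 1) (pvMark g (comp ++ [(r, c)]))
                [(r + 1, c), (r - 1, c), (r, c + 1), (r, c - 1)]
                (if pvCellAt g r c = "D" then d + 1 else d) := by
          rw [pvDfs_neg _ _ _ _ _ hAg, hcellm, ← pv_mark_snoc]
          exact pv_run_fuel _ _ _ (pvBurn (pvMark g (comp ++ [(r, c)])))
            f1' (f1' + 1)
            (pv_rect_of_map g _ (pv_map_length_mark (comp ++ [(r, c)]) g) hrect)
            (le_refl _) (by rw [pv_mark_snoc]; omega) (by rw [pv_mark_snoc]; omega)
        rw [hstep, ← pv_run_append]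
        have hburn' : pvBurn (pvMark g (comp ++ [(r, c)])) + 1 = pvBurn (pvMark g comp) := by
          rw [pv_mark_snoc]; exact hburn
        obtain ⟨new', he, hrun, hinv''⟩ := ih g (comp ++ [(r, c)])
          ([(r + 1, c), (r - 1, c), (r, c + 1), (r, c - 1)] ++ F')
          (if pvCellAt g r c = "D" then d + 1 else d) (f1' + 1) f2'
          hrect hinv' (by simp at hk ⊢; omega) (by omega) (by simp at h2 ⊢; omega)
        refine ⟨(r, c) :: new', by rw [he]; simp, ?_, by simpa using hinv''⟩
        rw [hrun]
        rw [Prod.mk.injEq]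
        refine ⟨by rw [List.append_assoc]; rfl, ?_⟩
        simp only [List.countP_cons]
        by_cases hD : pvCellAt g r c = "D" <;> simp [hD] <;> push_cast <;> ring

-- pvBGuard on an empty comp is A's guard
theorem pv_bguard_nil (g : List (List String)) (r c : Int) :
    pvBGuard g [] r c = pvGuard g r c := by
  simp [pvBGuard, pvGuard]

-- ===== VERDICT (by name: the statement is the Claim_ definition above) =====
theorem diamond_search_spec : Claim_equal_diamond_search := by
  intro grid row col diamond _ hpre
  unfold Spec_diamond_search diamond_search diamond_search_alt
  rcases hpre with hrect | hguard
  · have hble := pv_burn_le_cells grid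
    have hmark : pvMark grid [] = grid := rfl
    obtain ⟨new, he, hrun, _⟩ := pv_main (5 * pvBurn grid + 1) grid [] [(row, col)] diamond
      (pvCells grid + 1) (4 * pvCells grid + 2) hrect ⟨List.nodup_nil, by simp⟩
      (by rw [hmark]; simp) (by rw [hmark]; omega) (by rw [hmark]; simp; omega)
    rw [he]
    rw [hmark] at hrun
    have : (pvRun (pvCells grid + 1) grid [(row, col)] diamond).2
        = diamond + (new.countP (fun rc => pvCellAt grid rc.1 rc.2 == "D") : Nat) := by
      rw [hrun]
    rw [pv_run_cons] at this
    simpa [pvRun] using this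
  · rw [pvDfs_pos _ _ _ _ _ hguard]
    rw [show 4 * pvCells grid + 2 = (4 * pvCells grid + 1) + 1 from rfl]
    rw [pvComp_pos _ _ _ _ _ _ (by rw [pv_bguard_nil]; exact hguard), pvComp_nil]
    simp
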